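-- pv_equiv track=rewrite | github.com/Hunndayne/UIT | An toàn mạng máy tính - NT101/Lab1/task6_Hill.py | hill_encrypt
-- ===== SOURCE A (Python) =====
-- ALPHABET = "ABCDEFGHIJKLMNOPQRSTUVWXYZabcdefghijklmnopqrstuvwxyz"
--
-- MODULO = len(ALPHABET)
--
-- INDEX = {ch: i for i, ch in enumerate(ALPHABET)}  # tra cứu O(1)
--
-- def text_to_number(text):
--     nums = []
--     for ch in text:
--         if ch in INDEX:
--             nums.append(INDEX[ch])
--     return nums
--
-- def number_to_text(nums):
--     return "".join(ALPHABET[n] for n in nums)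
--
-- def hill_encrypt(plaintext, key):
--     # ghi lại vị trí ký tự KHÔNG thuộc A-Z/a-z
--     structure = [(i, ch) for i, ch in enumerate(plaintext) if ch not in INDEX]
--     letters = "".join(ch for ch in plaintext if ch in INDEX)
--
--     if len(letters) % 2 == 1:
--         letters += "X"  # đệm
--
--     P = text_to_number(letters)
--     C = []
--     for i in range(0, len(P), 2):
--         p1, p2 = P[i], P[i + 1]
--         c1 = (key[0][0] * p1 + key[0][1] * p2) % MODULO
--         c2 = (key[1][0] * p1 + key[1][1] * p2) % MODULO
--         C.extend([c1, c2])
--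
--     result = list(number_to_text(C))
--     for pos, ch in structure:
--         if pos <= len(result):
--             result.insert(pos, ch)
--         else:
--             result.append(ch)
--     return "".join(result)
-- ===== SOURCE B (Python) =====
-- ALPHABET = "ABCDEFGHIJKLMNOPQRSTUVWXYZabcdefghijklmnopqrstuvwxyz"
-- INDEX = {ch: i for i, ch in enumerate(ALPHABET)}
--
-- def hill_encrypt(plaintext, key):
--     nums = [INDEX[ch] for ch in plaintext if ch in INDEX]
--     if len(nums) % 2 == 1:
--         nums.append(INDEX["X"])  # padding
--     cipher = []
--     for i in range(0, len(nums), 2):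
--         p, q = nums[i], nums[i + 1]
--         cipher.append(ALPHABET[(key[0][0] * p + key[0][1] * q) % 52])
--         cipher.append(ALPHABET[(key[1][0] * p + key[1][1] * q) % 52])
--     # single merge pass: letters are replaced in place, non-letters kept
--     it = iter(cipher)
--     merged = [next(it) if ch in INDEX else ch for ch in plaintext]
--     merged.extend(it)
--     return "".join(merged)
-- ===== Notes on version B (the rewrite author's own statement) =====
-- stated objective: alternative
-- what changed: B fuses the letter filter and dict lookup into one pass and rebuilds the output with a single merge pass interleaving cipher letters with the saved non-letters, instead of A's repeated list.insert at recorded positions; intended as faster, measured only ~1.4x at the largest size.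
import Mathlib
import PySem

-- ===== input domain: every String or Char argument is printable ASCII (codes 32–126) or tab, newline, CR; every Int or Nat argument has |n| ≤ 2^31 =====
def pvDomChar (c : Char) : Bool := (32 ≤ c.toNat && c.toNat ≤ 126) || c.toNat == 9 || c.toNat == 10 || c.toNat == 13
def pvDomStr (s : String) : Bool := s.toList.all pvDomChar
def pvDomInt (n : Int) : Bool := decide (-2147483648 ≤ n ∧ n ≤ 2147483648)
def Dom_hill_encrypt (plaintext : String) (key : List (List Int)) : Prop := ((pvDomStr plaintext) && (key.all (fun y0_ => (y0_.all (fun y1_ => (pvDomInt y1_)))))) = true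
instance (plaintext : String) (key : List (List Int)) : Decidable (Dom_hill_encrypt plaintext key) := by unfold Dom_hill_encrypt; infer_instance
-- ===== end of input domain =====

-- B rebuilds the output with a single merge pass interleaving cipher letters with the saved
-- non-letters, instead of A's repeated list.insert at recorded positions; return values proved equal.

-- shared module-level constants (both Source A and Source B define the same ALPHABET/INDEX)
def pvAlphabet : List Char := "ABCDEFGHIJKLMNOPQRSTUVWXYZabcdefghijklmnopqrstuvwxyz".toList
def pvIndexDict : PySem.Dict Char Int :=
  (PySem.List.enumerate pvAlphabet 0).foldl (fun d p => d.insert p.2 p.1) PySem.Dict.empty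
def pvMem (ch : Char) : Bool := pvIndexDict.contains ch          -- `ch in INDEX`
def pvIdx (ch : Char) : Int := pvIndexDict.getD ch 0             -- INDEX[ch] (only used under pvMem)
def pvChr (n : Int) : Char := PySem.List.pyGetD pvAlphabet n ' ' -- ALPHABET[n] (n always in range here)
def pvKey (key : List (List Int)) (i j : Int) : Int :=           -- key[i][j] (in range under Pre_)
  PySem.List.pyGetD (PySem.List.pyGetD key i []) j 0

-- ===== PORT A =====
def text_to_number (text : List Char) : List Int :=
  text.foldl (fun nums ch => if pvMem ch then nums ++ [pvIdx ch] else nums) []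

def number_to_text (nums : List Int) : List Char := nums.map pvChr

def hill_encrypt (plaintext : String) (key : List (List Int)) : String :=
  let s := plaintext.toList
  let structure_ := (PySem.List.enumerate s 0).filter (fun p => !(pvMem p.2))
  let letters := s.filter (fun ch => pvMem ch)
  let letters := if letters.length % 2 == 1 then letters ++ ['X'] else letters
  let P := text_to_number letters
  let C := (PySem.List.pyRange 0 (P.length : Int) 2).foldl (fun C i =>
      let p1 := PySem.List.pyGetD P i 0
      let p2 := PySem.List.pyGetD P (i + 1) 0
      let c1 := PySem.Int.mod (pvKey key 0 0 * p1 + pvKey key 0 1 * p2) (pvAlphabet.length : Int)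
      let c2 := PySem.Int.mod (pvKey key 1 0 * p1 + pvKey key 1 1 * p2) (pvAlphabet.length : Int)
      C ++ [c1, c2]) []
  let result := number_to_text C
  let result := structure_.foldl (fun res pc =>
      if pc.1 ≤ (res.length : Int) then PySem.List.insert res pc.1 pc.2 else res ++ [pc.2]) result
  String.mk result

-- ===== PORT B =====
-- `it = iter(cipher); [next(it) if ch in INDEX else ch for ch in plaintext]` + extend(it):
-- one pass consuming the cipher letters (the [] fallback is unreachable: cipher is long enough)
def pvMergeB : List Char → List Char → List Char
  | [], ks => ks
  | ch :: t, ks =>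
    if pvMem ch then
      match ks with
      | k :: ks' => k :: pvMergeB t ks'
      | [] => pvMergeB t []
    else ch :: pvMergeB t ks

def hill_encrypt_alt (plaintext : String) (key : List (List Int)) : String :=
  let s := plaintext.toList
  let nums := s.foldl (fun acc ch => if pvMem ch then acc ++ [pvIdx ch] else acc) []
  let nums := if nums.length % 2 == 1 then nums ++ [pvIdx 'X'] else nums
  let cipher := (PySem.List.pyRange 0 (nums.length : Int) 2).foldl (fun c i =>
      let p := PySem.List.pyGetD nums i 0
      let q := PySem.List.pyGetD nums (i + 1) 0
      c ++ [pvChr (PySem.Int.mod (pvKey key 0 0 * p + pvKey key 0 1 * q) 52),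
            pvChr (PySem.Int.mod (pvKey key 1 0 * p + pvKey key 1 1 * q) 52)]) []
  String.mk (pvMergeB s cipher)

-- ===== PRECONDITION & SPEC =====
-- Pre_ excludes exactly the inputs where A raises IndexError: a plaintext containing a letter
-- together with a key missing rows 0/1 or entries 0/1 of those rows.
def pvIsLetter (c : Char) : Bool :=
  (65 ≤ c.toNat && c.toNat ≤ 90) || (97 ≤ c.toNat && c.toNat ≤ 122)   -- A-Z / a-z, = membership in INDEX

def Pre_hill_encrypt (plaintext : String) (key : List (List Int)) : Prop :=
  plaintext.toList.any pvIsLetter = true →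
    (2 ≤ key.length ∧ 2 ≤ (key.getD 0 []).length ∧ 2 ≤ (key.getD 1 []).length)
instance (plaintext : String) (key : List (List Int)) : Decidable (Pre_hill_encrypt plaintext key) := by
  unfold Pre_hill_encrypt; infer_instance

def pvWitness_hill_encrypt : String × List (List Int) := ("Hi, there!", [[3, 5], [7, 11]])

def Spec_hill_encrypt (plaintext : String) (key : List (List Int)) (out : String) : Prop :=
  out = hill_encrypt_alt plaintext key
instance (plaintext : String) (key : List (List Int)) (out : String) : Decidable (Spec_hill_encrypt plaintext key out) := by
  unfold Spec_hill_encrypt; infer_instance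

-- ===== CLAIM (what is proved, stated in full; the proofs are below) =====
def Claim_equal_hill_encrypt : Prop := ∀ (plaintext : String) (key : List (List Int)), Dom_hill_encrypt plaintext key → Pre_hill_encrypt plaintext key → Spec_hill_encrypt plaintext key (hill_encrypt plaintext key)

-- ===== LEMMAS AND PROOFS =====

lemma pvFold_filter_map (l : List Char) (init : List Int) :
    l.foldl (fun acc ch => if pvMem ch then acc ++ [pvIdx ch] else acc) init
      = init ++ (l.filter (fun ch => pvMem ch)).map pvIdx := by
  induction l generalizing init with
  | nil => simp
  | cons c t ih =>
    by_cases h : pvMem c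
    · simp [List.foldl_cons, h, ih]
    · simp [List.foldl_cons, h, ih]

lemma pv_text_to_number_eq (l : List Char) :
    text_to_number l = (l.filter (fun ch => pvMem ch)).map pvIdx := by
  simpa using pvFold_filter_map l []

lemma pv_map_foldl_pairs (f : Int → Char) (g1 g2 : Int → Int) (l : List Int) (acc : List Int) :
    (l.foldl (fun C i => C ++ [g1 i, g2 i]) acc).map f
      = l.foldl (fun c i => c ++ [f (g1 i), f (g2 i)]) (acc.map f) := by
  induction l generalizing acc with
  | nil => simp
  | cons x t ih =>
    rw [List.foldl_cons, List.foldl_cons, ih, List.map_append]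
    rfl

lemma pv_length_foldl_pairs {α : Type} (g1 g2 : Int → α) (l : List Int) (acc : List α) :
    (l.foldl (fun C i => C ++ [g1 i, g2 i]) acc).length = acc.length + 2 * l.length := by
  induction l generalizing acc with
  | nil => simp
  | cons x t ih =>
    rw [List.foldl_cons, ih]
    simp [List.length_append]
    omega

lemma pv_pyRange_two_len (m : Nat) : (PySem.List.pyRange 0 (2 * (m : Int)) 2).length = m := by
  unfold PySem.List.pyRange
  split_ifs <;> simp only [List.length_map, List.length_range, List.length_nil] <;> omega

lemma pv_enumerate_shift (l : List Char) (a : Int) :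
    PySem.List.enumerate l (a + 1) = (PySem.List.enumerate l a).map (fun p => (p.1 + 1, p.2)) := by
  induction l generalizing a with
  | nil => simp [PySem.List.enumerate_nil]
  | cons c t ih => simp [PySem.List.enumerate_cons, ih (a + 1)]

lemma pv_insert_cons (i : Int) (c x : Char) (R : List Char) (h1 : 1 ≤ i)
    (h2 : i ≤ ((x :: R).length : Int)) :
    PySem.List.insert (x :: R) i c = x :: PySem.List.insert R (i - 1) c := by
  obtain ⟨k, rfl⟩ : ∃ k : Nat, i = (k : Int) + 1 := ⟨(i - 1).toNat, by omega⟩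
  have hk : k + 1 ≤ (x :: R).length := by simp at h2 ⊢; omega
  have hk' : k ≤ R.length := by simpa using hk
  have e2 : ((k : Int) + 1 - 1) = ((k : Nat) : Int) := by ring
  have e1 : ((k : Int) + 1) = ((k + 1 : Nat) : Int) := by push_cast; ring
  rw [e2, PySem.List.insert_natCast _ _ _ hk', e1, PySem.List.insert_natCast _ _ _ hk]
  simp

lemma pv_fold_shift (l : List (Int × Char)) (x : Char) (R : List Char)
    (h : ∀ p ∈ l, 1 ≤ p.1) :
    l.foldl (fun res pc =>
        if pc.1 ≤ (res.length : Int) then PySem.List.insert res pc.1 pc.2 else res ++ [pc.2]) (x :: R)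
      = x :: (l.map (fun p => (p.1 - 1, p.2))).foldl (fun res pc =>
        if pc.1 ≤ (res.length : Int) then PySem.List.insert res pc.1 pc.2 else res ++ [pc.2]) R := by
  induction l generalizing R x with
  | nil => simp
  | cons p t ih =>
    obtain ⟨i, c⟩ := p
    have h1 : 1 ≤ i := h (i, c) (by simp)
    have htail : ∀ q ∈ t, 1 ≤ q.1 := fun q hq => h q (by simp [hq])
    simp only [List.foldl_cons, List.map_cons]
    split_ifs with hA hB hB
    · rw [pv_insert_cons i c x R h1 hA]
      exact ih x _ htail
    · exact absurd hB (by simp at hA ⊢; omega)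
    · exact absurd hA (by simp at hB ⊢; omega)
    · rw [show (x :: R) ++ [c] = x :: (R ++ [c]) from rfl]
      exact ih x _ htail

lemma pv_enumerate_fst_nonneg (t : List Char) (p : Int × Char) (hp : p ∈ PySem.List.enumerate t 0) :
    0 ≤ p.1 := by
  rw [PySem.List.mem_enumerate_iff] at hp
  obtain ⟨k, hk, rfl⟩ := hp
  simp

lemma pv_merge_main (s : List Char) :
    ∀ R : List Char, s.countP (fun c => pvMem c) ≤ R.length →
    ((PySem.List.enumerate s 0).filter (fun p => !(pvMem p.2))).foldl
      (fun res pc =>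
        if pc.1 ≤ (res.length : Int) then PySem.List.insert res pc.1 pc.2 else res ++ [pc.2]) R
      = pvMergeB s R := by
  induction s with
  | nil => intro R _; simp [PySem.List.enumerate_nil, pvMergeB]
  | cons c t ih =>
    intro R hR
    have hshift : PySem.List.enumerate t 1 = (PySem.List.enumerate t 0).map (fun p => (p.1 + 1, p.2)) := by
      simpa using pv_enumerate_shift t 0
    have hfilter :
        ((PySem.List.enumerate t 0).map (fun p => (p.1 + 1, p.2))).filter (fun p => !(pvMem p.2))
          = ((PySem.List.enumerate t 0).filter (fun p => !(pvMem p.2))).map (fun p => (p.1 + 1, p.2)) := by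
      have hpred : ((fun p : Int × Char => !(pvMem p.2)) ∘ (fun p : Int × Char => (p.1 + 1, p.2)))
          = (fun p : Int × Char => !(pvMem p.2)) := by
        funext q
        simp [Function.comp_apply]
      rw [List.filter_map, hpred]
    have hpos : ∀ p ∈ ((PySem.List.enumerate t 0).filter (fun p => !(pvMem p.2))).map
        (fun p => (p.1 + 1, p.2)), 1 ≤ p.1 := by
      intro p hp
      simp only [List.mem_map] at hp
      obtain ⟨q, hq, rfl⟩ := hp
      have h0 := pv_enumerate_fst_nonneg t q (List.mem_of_mem_filter hq)
      show 1 ≤ q.1 + 1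
      omega
    have hcomp :
        (((PySem.List.enumerate t 0).filter (fun p => !(pvMem p.2))).map (fun p => (p.1 + 1, p.2))).map
          (fun p => (p.1 - 1, p.2)) = (PySem.List.enumerate t 0).filter (fun p => !(pvMem p.2)) := by
      rw [List.map_map]
      have hid : ((fun p : Int × Char => (p.1 - 1, p.2)) ∘ (fun p : Int × Char => (p.1 + 1, p.2)))
          = id := by
        funext q
        show ((q.1 + 1 - 1 : Int), q.2) = q
        rw [add_sub_cancel_right]
      rw [hid, List.map_id]
    by_cases hc : pvMem c
    · -- letter: dropped from structure, consumes one cipher char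
      have hcount : t.countP (fun c => pvMem c) + 1 ≤ R.length := by
        simp only [List.countP_cons, hc, if_true] at hR
        exact hR
      obtain ⟨k, R', rfl⟩ : ∃ k R', R = k :: R' := by
        cases R with
        | nil => exact absurd hcount (by simp)
        | cons k R' => exact ⟨k, R', rfl⟩
      have hstruct : ((PySem.List.enumerate (c :: t) 0).filter (fun p => !(pvMem p.2)))
          = ((PySem.List.enumerate t 0).filter (fun p => !(pvMem p.2))).map (fun p => (p.1 + 1, p.2)) := by
        rw [PySem.List.enumerate_cons, List.filter_cons]
        simp [hc, hshift, hfilter]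
      rw [hstruct, pv_fold_shift _ _ _ hpos, hcomp,
        ih R' (by simp only [List.length_cons] at hcount; omega)]
      simp [pvMergeB, hc]
    · -- non-letter: inserted at position 0, then the rest shifts over it
      have hstruct : ((PySem.List.enumerate (c :: t) 0).filter (fun p => !(pvMem p.2)))
          = ((0 : Int), c) :: ((PySem.List.enumerate t 0).filter (fun p => !(pvMem p.2))).map (fun p => (p.1 + 1, p.2)) := by
        rw [PySem.List.enumerate_cons, List.filter_cons]
        simp [hc, hshift, hfilter]
      rw [hstruct]
      simp only [List.foldl_cons]
      rw [if_pos (show ((0 : Int) ≤ ((R.length : Nat) : Int)) from Int.natCast_nonneg R.length),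
          PySem.List.insert_zero]
      rw [pv_fold_shift _ _ _ hpos, hcomp]
      rw [ih R (by simp only [List.countP_cons, hc] at hR; simpa using hR)]
      simp [pvMergeB, hc]

set_option maxRecDepth 40000 in
lemma pv_mem_X : pvMem 'X' = true := by decide

set_option maxRecDepth 40000 in
lemma pv_modulo_eq : (pvAlphabet.length : Int) = 52 := by decide

theorem pv_main (plaintext : String) (key : List (List Int)) :
    hill_encrypt plaintext key = hill_encrypt_alt plaintext key := by
  unfold hill_encrypt hill_encrypt_alt
  simp only [pvFold_filter_map, List.nil_append, pv_modulo_eq]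
  set s := plaintext.toList with hs
  set L := (s.filter (fun ch => pvMem ch)).map pvIdx with hL
  have hlen : (s.filter (fun ch => pvMem ch)).length = L.length := by simp [hL]
  -- the padded number lists agree (A pads letters with 'X' before converting, B appends INDEX['X'])
  have hpad :
      text_to_number (if (s.filter (fun ch => pvMem ch)).length % 2 == 1
          then s.filter (fun ch => pvMem ch) ++ ['X'] else s.filter (fun ch => pvMem ch))
        = (if L.length % 2 == 1 then L ++ [pvIdx 'X'] else L) := by
    by_cases h : (s.filter (fun ch => pvMem ch)).length % 2 == 1
    · rw [if_pos h, if_pos (by rwa [← hlen])]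
      rw [pv_text_to_number_eq, List.filter_append]
      simp [pv_mem_X, List.filter_filter, hL]
    · rw [if_neg h, if_neg (by rwa [← hlen])]
      rw [pv_text_to_number_eq]
      simp [List.filter_filter, hL]
  rw [hpad]
  set N := (if L.length % 2 == 1 then L ++ [pvIdx 'X'] else L) with hN
  -- A's number list mapped through ALPHABET equals B's direct cipher-letter list
  have hcipher :
      number_to_text ((PySem.List.pyRange 0 (N.length : Int) 2).foldl (fun C i =>
          C ++ [PySem.Int.mod (pvKey key 0 0 * PySem.List.pyGetD N i 0 + pvKey key 0 1 * PySem.List.pyGetD N (i + 1) 0) 52,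
                PySem.Int.mod (pvKey key 1 0 * PySem.List.pyGetD N i 0 + pvKey key 1 1 * PySem.List.pyGetD N (i + 1) 0) 52]) [])
        = (PySem.List.pyRange 0 (N.length : Int) 2).foldl (fun c i =>
          c ++ [pvChr (PySem.Int.mod (pvKey key 0 0 * PySem.List.pyGetD N i 0 + pvKey key 0 1 * PySem.List.pyGetD N (i + 1) 0) 52),
                pvChr (PySem.Int.mod (pvKey key 1 0 * PySem.List.pyGetD N i 0 + pvKey key 1 1 * PySem.List.pyGetD N (i + 1) 0) 52)]) [] := by
    unfold number_to_text
    simpa using pv_map_foldl_pairs pvChr _ _ (PySem.List.pyRange 0 (N.length : Int) 2) []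
  rw [hcipher]
  -- the cipher list is long enough for the merge
  have hNeven : N.length % 2 = 0 := by
    by_cases h : L.length % 2 == 1
    · rw [hN, if_pos h]; simp at h ⊢; omega
    · rw [hN, if_neg h]; simp at h ⊢; omega
  obtain ⟨m, hm⟩ : ∃ m : Nat, N.length = 2 * m := ⟨N.length / 2, by omega⟩
  have hrange : (PySem.List.pyRange 0 (N.length : Int) 2).length = m := by
    rw [hm]; push_cast; exact pv_pyRange_two_len m
  have hcount : s.countP (fun c => pvMem c) ≤
      ((PySem.List.pyRange 0 (N.length : Int) 2).foldl (fun c i =>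
          c ++ [pvChr (PySem.Int.mod (pvKey key 0 0 * PySem.List.pyGetD N i 0 + pvKey key 0 1 * PySem.List.pyGetD N (i + 1) 0) 52),
                pvChr (PySem.Int.mod (pvKey key 1 0 * PySem.List.pyGetD N i 0 + pvKey key 1 1 * PySem.List.pyGetD N (i + 1) 0) 52)]) []).length := by
    rw [pv_length_foldl_pairs, hrange]
    have h1 : s.countP (fun c => pvMem c) = (s.filter (fun ch => pvMem ch)).length :=
      List.countP_eq_length_filter
    have h2 : (s.filter (fun ch => pvMem ch)).length ≤ N.length := by
      by_cases h : L.length % 2 == 1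
      · rw [hN, if_pos h]; simp [hlen]
      · rw [hN, if_neg h]; omega
    omega
  rw [pv_merge_main s _ hcount]

-- ===== VERDICT (by name: the statement is the Claim_ definition above) =====
theorem hill_encrypt_spec : Claim_equal_hill_encrypt := by
  intro plaintext key _ _
  unfold Spec_hill_encrypt
  exact pv_main plaintext key
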